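-- pv_equiv track=rewrite | github.com/AlexPerazzo/AdventofCode2022 | Advent Of Code 2022/Fresh 11th, 2022.py | monkey2_throw
-- ===== SOURCE A (Python) =====
-- def monkey2_throw(monkey0_count, monkey0_list, monkey6_list, monkey2_list):
--     for item in monkey0_list:
--         value = 13 * item
--         while value > 10000000:
--             value = value - 9699690
--
--         if value % 7 == 0:
--             monkey6_list.append(value)
--         else:
--             monkey2_list.append(value)
--         monkey0_count += 1
--     monkey0_list.clear()
--
--     return monkey0_count, monkey0_list, monkey6_list, monkey2_list
-- ===== SOURCE B (Python) =====
-- def monkey2_throw(monkey0_count, monkey0_list, monkey6_list, monkey2_list):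
--     # Note: A mutates monkey0_list/monkey6_list/monkey2_list in place; B only
--     # builds the returned lists (equivalence is about the return value).
--     D = 9699690
--     THR = 10000000
--     vals = []
--     for item in monkey0_list:
--         v = 13 * item
--         if v > THR:
--             v -= D * (-((THR - v) // D))  # one ceil-division step instead of a subtraction loop
--         vals.append(v)
--     m6 = monkey6_list + [v for v in vals if v % 7 == 0]
--     m2 = monkey2_list + [v for v in vals if v % 7 != 0]
--     return monkey0_count + len(monkey0_list), [], m6, m2
-- ===== Notes on version B (the rewrite author's own statement) =====
-- stated objective: alternative
-- what changed: Replaces the repeated-subtraction while loop with a single ceiling-division arithmetic step per item, and replaces the interleaved append loop with a map followed by two partitioning comprehensions; B does not mutate its list arguments (return value is identical).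
import Mathlib
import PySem

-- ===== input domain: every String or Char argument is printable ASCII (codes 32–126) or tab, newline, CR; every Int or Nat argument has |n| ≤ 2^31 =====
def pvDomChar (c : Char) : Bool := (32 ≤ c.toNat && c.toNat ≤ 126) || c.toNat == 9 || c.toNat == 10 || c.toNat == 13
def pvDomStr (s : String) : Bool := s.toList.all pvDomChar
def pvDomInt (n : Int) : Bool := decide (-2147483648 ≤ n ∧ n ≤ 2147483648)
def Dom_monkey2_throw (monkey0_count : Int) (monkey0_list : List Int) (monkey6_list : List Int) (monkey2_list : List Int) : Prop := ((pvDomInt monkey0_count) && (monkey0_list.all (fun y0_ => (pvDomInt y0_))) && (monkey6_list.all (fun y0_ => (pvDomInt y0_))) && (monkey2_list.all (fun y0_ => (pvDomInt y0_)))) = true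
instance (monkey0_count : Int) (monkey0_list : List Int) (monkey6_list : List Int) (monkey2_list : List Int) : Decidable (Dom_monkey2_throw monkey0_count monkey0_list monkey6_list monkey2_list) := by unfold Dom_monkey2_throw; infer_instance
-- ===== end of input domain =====

-- B replaces A's repeated-subtraction while loop by one ceiling-division step and the
-- interleaved append loop by map + two partitioning filters. A mutates its list
-- arguments in place, B does not; the equivalence proved here is about the return value.

-- ===== PORT A =====
-- the 'while value > 10000000: value -= 9699690' loop, step for step
def pvReduceLoop (value : Int) : Int :=
  if value > 10000000 then pvReduceLoop (value - 9699690) else value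
termination_by (value - 10000000).toNat
decreasing_by omega

def monkey2_throw (monkey0_count : Int) (monkey0_list : List Int) (monkey6_list : List Int) (monkey2_list : List Int) : Int × List Int × List Int × List Int :=
  let s := monkey0_list.foldl
    (fun (st : Int × List Int × List Int) item =>
      let value := pvReduceLoop (13 * item)
      if PySem.Int.mod value 7 = 0 then (st.1 + 1, st.2.1 ++ [value], st.2.2)
      else (st.1 + 1, st.2.1, st.2.2 ++ [value]))
    (monkey0_count, monkey6_list, monkey2_list)
  -- monkey0_list.clear() makes the second component []
  (s.1, [], s.2.1, s.2.2)

-- ===== PORT B =====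
-- one ceil-division step: v - D * (-((THR - v) // D)) when v > THR
def pvReduceFast (v : Int) : Int :=
  if v > 10000000 then v - 9699690 * (-(PySem.Int.floordiv (10000000 - v) 9699690)) else v

def monkey2_throw_alt (monkey0_count : Int) (monkey0_list : List Int) (monkey6_list : List Int) (monkey2_list : List Int) : Int × List Int × List Int × List Int :=
  let vals := monkey0_list.map (fun item => pvReduceFast (13 * item))
  let m6 := monkey6_list ++ vals.filter (fun v => PySem.Int.mod v 7 = 0)
  let m2 := monkey2_list ++ vals.filter (fun v => ¬ PySem.Int.mod v 7 = 0)
  (monkey0_count + (monkey0_list.length : Int), [], m6, m2)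

-- ===== PRECONDITION & SPEC =====
def Spec_monkey2_throw (monkey0_count : Int) (monkey0_list : List Int) (monkey6_list : List Int) (monkey2_list : List Int) (out : Int × List Int × List Int × List Int) : Prop := out = monkey2_throw_alt monkey0_count monkey0_list monkey6_list monkey2_list
instance (monkey0_count : Int) (monkey0_list : List Int) (monkey6_list : List Int) (monkey2_list : List Int) (out : Int × List Int × List Int × List Int) : Decidable (Spec_monkey2_throw monkey0_count monkey0_list monkey6_list monkey2_list out) := by unfold Spec_monkey2_throw; infer_instance

-- ===== CLAIM (what is proved, stated in full; the proofs are below) =====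
def Claim_equal_monkey2_throw : Prop := ∀ (monkey0_count : Int) (monkey0_list : List Int) (monkey6_list : List Int) (monkey2_list : List Int), Dom_monkey2_throw monkey0_count monkey0_list monkey6_list monkey2_list → Spec_monkey2_throw monkey0_count monkey0_list monkey6_list monkey2_list (monkey2_throw monkey0_count monkey0_list monkey6_list monkey2_list)

-- ===== LEMMAS AND PROOFS =====

theorem fast_step (v : Int) (h : v > 10000000) :
    pvReduceFast (v - 9699690) = pvReduceFast v := by
  have hq1 : -(PySem.Int.floordiv (-(v - 10000000)) 9699690) = -(PySem.Int.floordiv (10000000 - v) 9699690) := by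
    ring_nf
  have hb1 := (PySem.Int.neg_floordiv_neg_eq_iff_of_pos (a := v - 10000000)
      (b := 9699690) (q := -(PySem.Int.floordiv (10000000 - v) 9699690)) (by norm_num)).mp hq1
  by_cases h2 : v - 9699690 > 10000000
  · have hq2 : -(PySem.Int.floordiv (-(v - 9699690 - 10000000)) 9699690) = -(PySem.Int.floordiv (10000000 - (v - 9699690)) 9699690) := by
      ring_nf
    have hb2 := (PySem.Int.neg_floordiv_neg_eq_iff_of_pos (a := v - 9699690 - 10000000)
        (b := 9699690) (q := -(PySem.Int.floordiv (10000000 - (v - 9699690)) 9699690)) (by norm_num)).mp hq2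
    unfold pvReduceFast
    rw [if_pos h2, if_pos h]
    omega
  · unfold pvReduceFast
    rw [if_neg h2, if_pos h]
    omega

theorem reduce_eq (v : Int) : pvReduceLoop v = pvReduceFast v := by
  rw [pvReduceLoop]
  split
  · rename_i h
    rw [reduce_eq (v - 9699690)]
    exact fast_step v h
  · rename_i h
    unfold pvReduceFast
    rw [if_neg h]
termination_by (v - 10000000).toNat
decreasing_by omega

theorem fold_eq (xs : List Int) (c : Int) (m6 m2 : List Int) :
    xs.foldl
      (fun (st : Int × List Int × List Int) item =>
        let value := pvReduceLoop (13 * item)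
        if PySem.Int.mod value 7 = 0 then (st.1 + 1, st.2.1 ++ [value], st.2.2)
        else (st.1 + 1, st.2.1, st.2.2 ++ [value]))
      (c, m6, m2)
    = (c + (xs.length : Int),
       m6 ++ (xs.map (fun item => pvReduceFast (13 * item))).filter (fun v => PySem.Int.mod v 7 = 0),
       m2 ++ (xs.map (fun item => pvReduceFast (13 * item))).filter (fun v => ¬ PySem.Int.mod v 7 = 0)) := by
  induction xs generalizing c m6 m2 with
  | nil => simp
  | cons x xs ih =>
    simp only [List.foldl_cons, List.map_cons, List.filter_cons, List.length_cons]
    rw [reduce_eq]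
    by_cases hx : PySem.Int.mod (pvReduceFast (13 * x)) 7 = 0
    · rw [if_pos hx, ih, if_pos (decide_eq_true hx),
        if_neg (fun hc => (of_decide_eq_true hc) hx)]
      simp [List.append_assoc]
      all_goals omega
    · rw [if_neg hx, ih, if_neg (fun hc => hx (of_decide_eq_true hc)),
        if_pos (decide_eq_true hx)]
      simp [List.append_assoc]
      all_goals omega

-- ===== VERDICT (by name: the statement is the Claim_ definition above) =====
theorem monkey2_throw_spec : Claim_equal_monkey2_throw := by
  intro c l l6 l2 _
  unfold Spec_monkey2_throw monkey2_throw monkey2_throw_alt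
  simp only [fold_eq]
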